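-- pv_equiv track=rewrite | github.com/vgcarlol/TeoriaDeCompu | lab2/Ejercicio 3/codigo.py | format_regex
-- ===== SOURCE A (Python) =====
-- def format_regex(regex):
--     formatted = []
--     operators = set(['|', '?', '+', '*', '(', ')'])
--     length = len(regex)
--
--     i = 0
--     while i < length:
--         c1 = regex[i]
--         formatted.append(c1)
--
--         if c1 == '\\':  # Escapar el siguiente carácter
--             i += 1
--             formatted.append(regex[i])
--         elif c1 not in operators and i + 1 < length:
--             c2 = regex[i + 1]
--             if c2 not in operators and c2 != '\\' and c2 != '(' and c2 != ')':
--                 formatted.append('.')  # Insertar concatenación implícita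
--
--         i += 1
--
--     return ''.join(formatted)
-- ===== SOURCE B (Python) =====
-- def format_regex(regex):
--     operators = {'|', '?', '+', '*', '(', ')'}
--     # pass 1: tokenize (an escape consumes the next char; a lone trailing
--     # backslash raises IndexError when reading regex[i + 1], like A)
--     tokens = []
--     i = 0
--     while i < len(regex):
--         if regex[i] == '\\':
--             tokens.append(regex[i] + regex[i + 1])
--             i += 2
--         else:
--             tokens.append(regex[i])
--             i += 1
--     # pass 2: join tokens, inserting a concatenation dot between adjacent plain literal tokens
--     out = []
--     for k, t in enumerate(tokens):
--         out.append(t)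
--         if k + 1 < len(tokens):
--             nxt = tokens[k + 1]
--             if len(t) == 1 and t not in operators and len(nxt) == 1 and nxt not in operators:
--                 out.append('.')
--     return ''.join(out)
-- ===== Notes on version B (the rewrite author's own statement) =====
-- stated objective: alternative
-- what changed: Replaces A's single index-driven scan with inline lookahead by a two-pass decomposition: first tokenize the regex into escape (two-char) and literal (one-char) tokens, then join the token list inserting a concatenation dot between two adjacent plain literal tokens.
import Mathlib
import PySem

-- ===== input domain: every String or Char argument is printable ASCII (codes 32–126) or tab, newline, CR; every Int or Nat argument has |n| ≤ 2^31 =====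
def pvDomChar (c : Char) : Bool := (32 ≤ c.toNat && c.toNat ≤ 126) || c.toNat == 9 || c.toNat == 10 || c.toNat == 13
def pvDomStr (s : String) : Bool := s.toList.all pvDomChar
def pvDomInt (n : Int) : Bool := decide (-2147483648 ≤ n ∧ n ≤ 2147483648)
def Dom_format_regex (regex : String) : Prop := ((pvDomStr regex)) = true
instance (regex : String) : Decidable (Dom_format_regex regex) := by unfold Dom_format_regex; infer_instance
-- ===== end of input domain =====

-- B re-implements A's single indexed lookahead scan as two passes (tokenize escapes, then join
-- tokens with a concatenation dot between adjacent plain literal tokens); alternative decomposition, same cost.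


-- ===== PORT A =====
-- A's operator set membership test
def pvIsOpA (c : Char) : Bool := c == '|' || c == '?' || c == '+' || c == '*' || c == '(' || c == ')'

-- A's combined lookahead test: c1 not an operator, there is a next char c2, and
-- c2 not in operators nor a backslash nor a parenthesis  ⇒ append the concatenation dot
def pvDotA (c1 : Char) : List Char → List Char
  | [] => []
  | c2 :: _ =>
    if !pvIsOpA c1 && (!pvIsOpA c2 && c2 != '\\' && c2 != '(' && c2 != ')') then ['.'] else []

-- A's while-loop over the index, as recursion on the remaining suffix of the string; `formatted`
-- is the accumulator, the i+1 lookahead reads the head of the suffix. Where Python raises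
-- IndexError (lone trailing backslash, excluded by Pre_) the match returns the list as built.
def pvGoA (acc : List Char) : List Char → List Char
  | [] => acc
  | c1 :: rest =>
    if c1 == '\\' then
      match rest with
      | [] => acc ++ [c1]            -- Python raises IndexError here; outside Pre_
      | d :: rest' => pvGoA (acc ++ [c1] ++ [d]) rest'
    else
      pvGoA (acc ++ [c1] ++ pvDotA c1 rest) rest

def format_regex (regex : String) : String := String.ofList (pvGoA [] regex.toList)

-- ===== PORT B =====
-- B's operator set membership test
def pvIsOpB (c : Char) : Bool := c == '|' || c == '?' || c == '+' || c == '*' || c == '(' || c == ')'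

-- pass 1: tokenize; '\' consumes the next char into a two-char token
-- (on a lone trailing backslash Python B raises IndexError; outside Pre_)
def pvTok : List Char → List (List Char)
  | [] => []
  | c :: rest =>
    if c == '\\' then
      match rest with
      | [] => [[c]]                  -- Python raises IndexError here; outside Pre_
      | d :: rest' => [c, d] :: pvTok rest'
    else
      [c] :: pvTok rest
  decreasing_by all_goals (simp; try omega)

-- a plain literal token: single char, not an operator
def pvPlain : List Char → Bool
  | [c] => !pvIsOpB c
  | _ => false

-- the dot inserted between a token and its successor (if any)
def pvDotB (t : List Char) : List (List Char) → List Char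
  | [] => []
  | t2 :: _ => if pvPlain t && pvPlain t2 then ['.'] else []

-- pass 2: join the tokens, inserting a concatenation dot between two adjacent plain tokens
def pvEmit : List (List Char) → List Char
  | [] => []
  | t :: ts => t ++ pvDotB t ts ++ pvEmit ts

def format_regex_alt (regex : String) : String := String.ofList (pvEmit (pvTok regex.toList))

-- ===== PRECONDITION & SPEC =====
-- Pre_ excludes exactly the strings ending in an odd run of backslashes, on which Python A
-- raises IndexError (the escape reads past the end of the string); A returns on all other inputs.
def Pre_format_regex (regex : String) : Prop :=
  (regex.toList.reverse.takeWhile (· == '\\')).length % 2 = 0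
instance (regex : String) : Decidable (Pre_format_regex regex) := by unfold Pre_format_regex; infer_instance
def pvWitness_format_regex : String := "a|b*\\nc"
def Spec_format_regex (regex : String) (out : String) : Prop := out = format_regex_alt regex
instance (regex : String) (out : String) : Decidable (Spec_format_regex regex out) := by unfold Spec_format_regex; infer_instance

-- ===== CLAIM (what is proved, stated in full; the proofs are below) =====
def Claim_equal_format_regex : Prop := ∀ (regex : String), Dom_format_regex regex → Pre_format_regex regex → Spec_format_regex regex (format_regex regex)

-- ===== LEMMAS AND PROOFS =====

-- trailing-backslash run length
def pvTB (cs : List Char) : Nat := (cs.reverse.takeWhile (· == '\\')).length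

lemma pvTB_cons_ne (c : Char) (rest : List Char) (h : c ≠ '\\') : pvTB (c :: rest) = pvTB rest := by
  have hc : (c == '\\') = false := by simp [h]
  have hr : rest.reverse.length = rest.length := by simp
  unfold pvTB
  rw [List.reverse_cons, List.takeWhile_append]
  split_ifs with h1
  · simp [List.takeWhile, hc]
    omega
  · rfl

lemma pvTB_bs2 (b : Char) (rest : List Char) : pvTB ('\\' :: b :: rest) % 2 = pvTB rest % 2 := by
  have hrev : ('\\' :: b :: rest).reverse = rest.reverse ++ [b, '\\'] := by simp
  unfold pvTB
  rw [hrev, List.takeWhile_append]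
  split_ifs with h1
  · by_cases hb : b = '\\'
    · simp [List.takeWhile, hb] at h1 ⊢
      omega
    · have hbc : (b == '\\') = false := by simp [hb]
      simp [List.takeWhile, hbc] at h1 ⊢
      omega
  · rfl

lemma pvIsOpBA (c : Char) : pvIsOpB c = pvIsOpA c := rfl

-- a two-char (escape) token never gets a dot after it
lemma pvDotB_escape (d : Char) (ts : List (List Char)) : pvDotB ['\\', d] ts = [] := by
  cases ts <;> simp [pvDotB, pvPlain]

-- A's lookahead condition equals B's plain-token test (the '(' ')' checks are subsumed)
lemma pvDotCond (c2 : Char) (h : (c2 == '\\') = false) :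
    (!pvIsOpA c2 && c2 != '\\' && c2 != '(' && c2 != ')') = !pvIsOpB c2 := by
  simp only [pvIsOpA, pvIsOpB, bne, h]
  cases h1 : (c2 == '|') <;> cases h2 : (c2 == '?') <;> cases h3 : (c2 == '+') <;>
    cases h4 : (c2 == '*') <;> cases h5 : (c2 == '(') <;> cases h6 : (c2 == ')') <;> simp

lemma pvMain : ∀ (n : Nat) (cs : List Char), cs.length ≤ n → ∀ (acc : List Char),
    pvTB cs % 2 = 0 → pvGoA acc cs = acc ++ pvEmit (pvTok cs) := by
  intro n
  induction n with
  | zero =>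
    intro cs hlen acc _
    have hnil : cs = [] := List.eq_nil_of_length_eq_zero (Nat.le_zero.mp hlen)
    subst hnil
    simp [pvGoA, pvTok, pvEmit]
  | succ n ih =>
    intro cs hlen acc h
    match cs with
    | [] => simp [pvGoA, pvTok, pvEmit]
    | c :: rest =>
      by_cases hc : c = '\\'
      · subst hc
        match rest with
        | [] =>
          exfalso
          simp [pvTB, List.takeWhile] at h
        | d :: rest' =>
          have h' : pvTB rest' % 2 = 0 := by rw [← pvTB_bs2 d rest']; exact h
          have hlen' : rest'.length ≤ n := by simp at hlen; omega
          have hstep : pvGoA acc ('\\' :: d :: rest') = pvGoA (acc ++ ['\\'] ++ [d]) rest' := by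
            simp [pvGoA]
          have htok : pvTok ('\\' :: d :: rest') = ['\\', d] :: pvTok rest' := by
            simp [pvTok]
          rw [hstep, ih rest' hlen' _ h', htok]
          simp only [pvEmit, pvDotB_escape]
          simp
      · have hcb : (c == '\\') = false := by simp [hc]
        have hrest : pvTB rest % 2 = 0 := by rw [← pvTB_cons_ne c rest hc]; exact h
        have hlen' : rest.length ≤ n := by simp at hlen; omega
        have htok : pvTok (c :: rest) = [c] :: pvTok rest := by rw [pvTok.eq_def]; simp [hcb]
        have hstep : pvGoA acc (c :: rest) = pvGoA (acc ++ [c] ++ pvDotA c rest) rest := by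
          rw [pvGoA.eq_def]; simp [hcb]
        have hdot : pvDotA c rest = pvDotB [c] (pvTok rest) := by
          cases rest with
          | nil => simp [pvDotA, pvTok, pvDotB]
          | cons c2 rest2 =>
            by_cases hc2 : c2 = '\\'
            · subst hc2
              cases rest2 with
              | nil =>
                exfalso
                rw [pvTB_cons_ne c _ hc] at h
                simp [pvTB, List.takeWhile] at h
              | cons e rest3 =>
                have ht2 : pvTok ('\\' :: e :: rest3) = ['\\', e] :: pvTok rest3 := by
                  simp [pvTok]
                rw [ht2]
                simp [pvDotA, pvDotB, pvPlain]
            · have hc2b : (c2 == '\\') = false := by simp [hc2]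
              have ht2 : pvTok (c2 :: rest2) = [c2] :: pvTok rest2 := by rw [pvTok.eq_def]; simp [hc2b]
              have e1 : pvDotA c (c2 :: rest2) =
                  if !pvIsOpA c && !pvIsOpB c2 then ['.'] else [] := by
                simp only [pvDotA, pvDotCond c2 hc2b]
              have e2 : pvDotB [c] ([c2] :: pvTok rest2) =
                  if !pvIsOpB c && !pvIsOpB c2 then ['.'] else [] := by
                simp [pvDotB, pvPlain]
              rw [e1, ht2, e2, pvIsOpBA c, pvIsOpBA c2]
        rw [hstep, ih rest hlen' _ hrest, htok]
        simp only [pvEmit, hdot]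
        simp

-- ===== VERDICT (by name: the statement is the Claim_ definition above) =====
theorem format_regex_spec : Claim_equal_format_regex := by
  intro regex _ hpre
  unfold Spec_format_regex format_regex format_regex_alt
  rw [pvMain regex.toList.length regex.toList le_rfl [] hpre, List.nil_append]
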